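-- pv_equiv track=rewrite | github.com/rjwalters/makefour | training/src/data/encoding.py | board_from_moves
-- ===== SOURCE A (Python) =====
-- from typing import Literal, TypeAlias
--
-- ROWS = 6
--
-- COLUMNS = 7
--
-- Board: TypeAlias = list[list[int | None]]  # 6x7, None=empty, 1=player1, 2=player2
--
-- Player: TypeAlias = Literal[1, 2]
--
-- def board_from_moves(moves: list[int]) -> tuple[Board, Player]:
--     """
--     Reconstructs a board state from a sequence of moves.
--
--     Args:
--         moves: List of column indices (0-6) representing each move in order.
--
--     Returns:
--         Tuple of (board, current_player) after all moves are applied.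
--     """
--     board: Board = [[None for _ in range(COLUMNS)] for _ in range(ROWS)]
--     current_player: Player = 1
--
--     for col in moves:
--         # Find the lowest empty row in the column
--         for row in range(ROWS - 1, -1, -1):
--             if board[row][col] is None:
--                 board[row][col] = current_player
--                 break
--         # Alternate players
--         current_player = 2 if current_player == 1 else 1
--
--     return board, current_player
-- ===== SOURCE B (Python) =====
-- ROWS = 6
-- COLUMNS = 7
--
-- def board_from_moves(moves):
--     board = [[None] * COLUMNS for _ in range(ROWS)]
--     heights = [0] * COLUMNS
--     current_player = 1
--     for col in moves:
--         h = heights[col]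
--         if h < ROWS:
--             board[ROWS - 1 - h][col] = current_player
--             heights[col] = h + 1
--         current_player = 2 if current_player == 1 else 1
--     return board, current_player
-- ===== Notes on version B (the rewrite author's own statement) =====
-- stated objective: idiomatic
-- what changed: B keeps a per-column height array and places each piece at ROWS-1-heights[col] in O(1), replacing A's bottom-up inner scan of the column.
import Mathlib
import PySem

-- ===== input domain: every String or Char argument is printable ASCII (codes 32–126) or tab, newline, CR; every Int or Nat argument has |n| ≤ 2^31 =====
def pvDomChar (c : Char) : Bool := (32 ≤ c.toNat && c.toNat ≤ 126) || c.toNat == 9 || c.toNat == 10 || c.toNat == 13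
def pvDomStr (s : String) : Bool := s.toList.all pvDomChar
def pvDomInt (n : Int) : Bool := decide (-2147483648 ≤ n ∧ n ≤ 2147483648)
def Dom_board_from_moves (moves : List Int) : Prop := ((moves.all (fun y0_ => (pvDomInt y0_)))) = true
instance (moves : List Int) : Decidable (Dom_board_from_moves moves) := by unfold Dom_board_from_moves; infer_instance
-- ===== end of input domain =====

-- B replaces A's bottom-up inner scan of the column with a per-column height array and an O(1) placement index.

-- ===== PORT A =====
-- inner 'for row in range(ROWS-1,-1,-1): … break' of A; board[row][col] reads/writes via pyGetD/pySetD,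
-- exact under Pre_ (row is always in range; col in range is Pre_'s side condition)
def pvPlaceA (rows : List Int) (b : List (List (Option Int))) (col p : Int) :
    List (List (Option Int)) :=
  match rows with
  | [] => b
  | r :: rest =>
    let rowL := PySem.List.pyGetD b r []
    if PySem.List.pyGetD rowL col none = none then
      PySem.List.pySetD b r (PySem.List.pySetD rowL col (some p))
    else pvPlaceA rest b col p

def board_from_moves (moves : List Int) : List (List (Option Int)) × Int :=
  let init : List (List (Option Int)) := List.replicate 6 (List.replicate 7 none)
  moves.foldl
    (fun st col =>
      (pvPlaceA (PySem.List.pyRange 5 (-1) (-1)) st.1 col st.2,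
       if st.2 = 1 then 2 else 1))
    (init, 1)

-- ===== PORT B =====
def board_from_moves_alt (moves : List Int) : List (List (Option Int)) × Int :=
  let fin := moves.foldl
    (fun (st : List (List (Option Int)) × List Int × Int) col =>
      let b := st.1; let hs := st.2.1; let p := st.2.2
      let h := PySem.List.pyGetD hs col 0
      let st1 :=
        if h < 6 then
          (PySem.List.pySetD b (6 - 1 - h)
             (PySem.List.pySetD (PySem.List.pyGetD b (6 - 1 - h) []) col (some p)),
           PySem.List.pySetD hs col (h + 1))
        else (b, hs)
      (st1.1, st1.2, if p = 1 then 2 else 1))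
    (List.replicate 6 (List.replicate 7 none), List.replicate 7 0, 1)
  (fin.1, fin.2.2)

-- ===== PRECONDITION & SPEC =====
-- Pre_ excludes exactly the inputs on which both Pythons raise IndexError: a column index whose magnitude exceeds the board width (no valid positive or negative Python index).
def Pre_board_from_moves (moves : List Int) : Prop := ∀ c ∈ moves, -7 ≤ c ∧ c < 7
instance (moves : List Int) : Decidable (Pre_board_from_moves moves) := by
  unfold Pre_board_from_moves; infer_instance
def pvWitness_board_from_moves : List Int := [3, 3, -1, 0, 6, 3]

def Spec_board_from_moves (moves : List Int) (out : List (List (Option Int)) × Int) : Prop := out = board_from_moves_alt moves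
instance (moves : List Int) (out : List (List (Option Int)) × Int) : Decidable (Spec_board_from_moves moves out) := by unfold Spec_board_from_moves; infer_instance

-- ===== CLAIM (what is proved, stated in full; the proofs are below) =====
def Claim_equal_board_from_moves : Prop := ∀ (moves : List Int), Dom_board_from_moves moves → Pre_board_from_moves moves → Spec_board_from_moves moves (board_from_moves moves)

-- ===== LEMMAS AND PROOFS =====


-- normalized column index
def pvJ (c : Int) : Nat := (if c < 0 then c + 7 else c).toNat

-- loop invariant: board shape 6×7, heights length 7, and each column j is filled
-- exactly in its bottom (hs[j]) rows.
def pvInv (b : List (List (Option Int))) (hs : List Int) : Prop :=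
  b.length = 6 ∧ (∀ row ∈ b, row.length = 7) ∧ hs.length = 7 ∧
  ∀ j : Nat, j < 7 →
    0 ≤ hs.getD j 0 ∧ hs.getD j 0 ≤ 6 ∧
    ∀ r : Nat, r < 6 →
      ((b.getD r []).getD j none = none ↔ (r : Int) < 6 - hs.getD j 0)


lemma pvGetD_norm {α : Type} (xs : List α) (c : Int) (d : α)
    (hlen : xs.length = 7) (h1 : -7 ≤ c) (h2 : c < 7) :
    PySem.List.pyGetD xs c d = xs.getD (pvJ c) d := by
  by_cases hc : 0 ≤ c
  · have : pvJ c = c.toNat := by unfold pvJ; split_ifs <;> omega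
    rw [this]
    simp [PySem.List.pyGetD, PySem.List.pyGet?, PySem.List.pyIdx?, hlen, hc, h2,
      List.getD_eq_getElem?_getD]
  · have : pvJ c = 7 - (-c).toNat := by unfold pvJ; split_ifs <;> omega
    rw [this]
    simp [PySem.List.pyGetD, PySem.List.pyGet?, PySem.List.pyIdx?, hlen, hc, h1,
      List.getD_eq_getElem?_getD]

lemma pvSetD_norm {α : Type} (xs : List α) (c : Int) (v : α)
    (hlen : xs.length = 7) (h1 : -7 ≤ c) (h2 : c < 7) :
    PySem.List.pySetD xs c v = xs.set (pvJ c) v := by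
  by_cases hc : 0 ≤ c
  · have : pvJ c = c.toNat := by unfold pvJ; split_ifs <;> omega
    rw [this]
    simp [PySem.List.pySetD, PySem.List.pySet?, PySem.List.pyIdx?, hlen, hc, h2]
  · have : pvJ c = 7 - (-c).toNat := by unfold pvJ; split_ifs <;> omega
    rw [this]
    simp [PySem.List.pySetD, PySem.List.pySet?, PySem.List.pyIdx?, hlen, hc, h1]

lemma pvRowI (b : List (List (Option Int))) (hb6 : b.length = 6) (i : Int)
    (hi0 : 0 ≤ i) (hi6 : i < 6) :
    PySem.List.pyGetD b i [] = b.getD i.toNat [] := by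
  simp [PySem.List.pyGetD, PySem.List.pyGet?, PySem.List.pyIdx?, hb6, hi0, hi6,
    List.getD_eq_getElem?_getD]

lemma pvRowSetI (b : List (List (Option Int))) (i : Int) (hi0 : 0 ≤ i)
    (v : List (Option Int)) :
    PySem.List.pySetD b i v = b.set i.toNat v := by
  simp only [PySem.List.pySetD, PySem.List.pySet?, PySem.List.pyIdx?, if_pos hi0]
  split_ifs with hlen
  · rfl
  · simp only [Option.map_none, Option.getD_none]
    exact (List.set_eq_of_length_le (by omega)).symm

lemma pvPlace_eq (b : List (List (Option Int))) (hs : List Int) (c p : Int)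
    (hInv : pvInv b hs) (h1 : -7 ≤ c) (h2 : c < 7) (hlt : hs.getD (pvJ c) 0 < 6) :
    pvPlaceA (PySem.List.pyRange 5 (-1) (-1)) b c p =
      b.set (5 - (hs.getD (pvJ c) 0).toNat)
        ((b.getD (5 - (hs.getD (pvJ c) 0).toNat) []).set (pvJ c) (some p)) := by
  obtain ⟨hb6, hrows, hhs7, hcols⟩ := hInv
  have hj : pvJ c < 7 := by unfold pvJ; split_ifs <;> omega
  obtain ⟨hh0, hh6, hcell⟩ := hcols (pvJ c) hj
  set h := hs.getD (pvJ c) 0 with hh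
  have hrange : PySem.List.pyRange 5 (-1) (-1) = [5,4,3,2,1,0] := by decide
  have hrowlen : ∀ r : Nat, r < 6 → (b.getD r []).length = 7 := by
    intro r hr
    have hlt : r < b.length := by omega
    rw [List.getD_eq_getElem b [] hlt]
    exact hrows _ (List.getElem_mem hlt)
  have hrow : ∀ r : Nat, r < 6 → PySem.List.pyGetD b (r : Int) [] = b.getD r [] := by
    intro r hr
    simp [PySem.List.pyGetD, PySem.List.pyGet?, PySem.List.pyIdx?, hb6, hr, List.getD_eq_getElem?_getD]
  have hcellr : ∀ r : Nat, r < 6 →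
      PySem.List.pyGetD (b.getD r []) c none = (b.getD r []).getD (pvJ c) none :=
    fun r hr => pvGetD_norm _ _ _ (hrowlen r hr) h1 h2
  have hsetr : ∀ r : Nat, r < 6 →
      PySem.List.pySetD (b.getD r []) c (some p) = (b.getD r []).set (pvJ c) (some p) :=
    fun r hr => pvSetD_norm _ _ _ (hrowlen r hr) h1 h2
  rw [hrange]
  have e5 : PySem.List.pyGetD b (5:Int) [] = b.getD 5 [] := by exact_mod_cast hrow 5 (by omega)
  have e4 : PySem.List.pyGetD b (4:Int) [] = b.getD 4 [] := by exact_mod_cast hrow 4 (by omega)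
  have e3 : PySem.List.pyGetD b (3:Int) [] = b.getD 3 [] := by exact_mod_cast hrow 3 (by omega)
  have e2 : PySem.List.pyGetD b (2:Int) [] = b.getD 2 [] := by exact_mod_cast hrow 2 (by omega)
  have e1 : PySem.List.pyGetD b (1:Int) [] = b.getD 1 [] := by exact_mod_cast hrow 1 (by omega)
  have e0 : PySem.List.pyGetD b (0:Int) [] = b.getD 0 [] := by exact_mod_cast hrow 0 (by omega)
  have g : ∀ (r : Nat) (v : List (Option Int)), PySem.List.pySetD b ((r:Nat):Int) v = b.set r v := by
    intro r v; simp
  have g5 : ∀ v, PySem.List.pySetD b (5:Int) v = b.set 5 v := by intro v; exact_mod_cast g 5 v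
  have g4 : ∀ v, PySem.List.pySetD b (4:Int) v = b.set 4 v := by intro v; exact_mod_cast g 4 v
  have g3 : ∀ v, PySem.List.pySetD b (3:Int) v = b.set 3 v := by intro v; exact_mod_cast g 3 v
  have g2 : ∀ v, PySem.List.pySetD b (2:Int) v = b.set 2 v := by intro v; exact_mod_cast g 2 v
  have g1 : ∀ v, PySem.List.pySetD b (1:Int) v = b.set 1 v := by intro v; exact_mod_cast g 1 v
  have g0 : ∀ v, PySem.List.pySetD b (0:Int) v = b.set 0 v := by intro v; exact_mod_cast g 0 v
  have c5 := hcell 5 (by omega); have c4 := hcell 4 (by omega); have c3 := hcell 3 (by omega)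
  have c2 := hcell 2 (by omega); have c1 := hcell 1 (by omega); have c0 := hcell 0 (by omega)
  have s5 := hsetr 5 (by omega); have s4 := hsetr 4 (by omega); have s3 := hsetr 3 (by omega)
  have s2 := hsetr 2 (by omega); have s1 := hsetr 1 (by omega); have s0 := hsetr 0 (by omega)
  interval_cases h <;>
    simp only [pvPlaceA, e5, e4, e3, e2, e1, e0,
      hcellr 5 (by omega), hcellr 4 (by omega), hcellr 3 (by omega),
      hcellr 2 (by omega), hcellr 1 (by omega), hcellr 0 (by omega),
      s5, s4, s3, s2, s1, s0, c5, c4, c3, c2, c1, c0] <;>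
    norm_num [g5, g4, g3, g2, g1, g0] <;> norm_num [show Int.toNat 0 = 0 from rfl, show Int.toNat 1 = 1 from rfl, show Int.toNat 2 = 2 from rfl, show Int.toNat 3 = 3 from rfl, show Int.toNat 4 = 4 from rfl, show Int.toNat 5 = 5 from rfl]

lemma pvPlace_full (b : List (List (Option Int))) (hs : List Int) (c p : Int)
    (hInv : pvInv b hs) (h1 : -7 ≤ c) (h2 : c < 7) (hfull : ¬ hs.getD (pvJ c) 0 < 6) :
    pvPlaceA (PySem.List.pyRange 5 (-1) (-1)) b c p = b := by
  obtain ⟨hb6, hrows, hhs7, hcols⟩ := hInv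
  have hj : pvJ c < 7 := by unfold pvJ; split_ifs <;> omega
  obtain ⟨hh0, hh6, hcell⟩ := hcols (pvJ c) hj
  have h6 : hs.getD (pvJ c) 0 = 6 := by omega
  have hrange : PySem.List.pyRange 5 (-1) (-1) = [5,4,3,2,1,0] := by decide
  have hrow : ∀ r : Nat, r < 6 → PySem.List.pyGetD b (r : Int) [] = b.getD r [] := by
    intro r hr
    simp [PySem.List.pyGetD, PySem.List.pyGet?, PySem.List.pyIdx?, hb6, hr, List.getD_eq_getElem?_getD]
  have hrowlen : ∀ r : Nat, r < 6 → (b.getD r []).length = 7 := by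
    intro r hr
    have hlt : r < b.length := by omega
    rw [List.getD_eq_getElem b [] hlt]
    exact hrows _ (List.getElem_mem hlt)
  have hcellr : ∀ r : Nat, r < 6 →
      PySem.List.pyGetD (b.getD r []) c none = (b.getD r []).getD (pvJ c) none :=
    fun r hr => pvGetD_norm _ _ _ (hrowlen r hr) h1 h2
  have e5 : PySem.List.pyGetD b (5:Int) [] = b.getD 5 [] := by exact_mod_cast hrow 5 (by omega)
  have e4 : PySem.List.pyGetD b (4:Int) [] = b.getD 4 [] := by exact_mod_cast hrow 4 (by omega)
  have e3 : PySem.List.pyGetD b (3:Int) [] = b.getD 3 [] := by exact_mod_cast hrow 3 (by omega)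
  have e2 : PySem.List.pyGetD b (2:Int) [] = b.getD 2 [] := by exact_mod_cast hrow 2 (by omega)
  have e1 : PySem.List.pyGetD b (1:Int) [] = b.getD 1 [] := by exact_mod_cast hrow 1 (by omega)
  have e0 : PySem.List.pyGetD b (0:Int) [] = b.getD 0 [] := by exact_mod_cast hrow 0 (by omega)
  have c5 := hcell 5 (by omega); have c4 := hcell 4 (by omega); have c3 := hcell 3 (by omega)
  have c2 := hcell 2 (by omega); have c1 := hcell 1 (by omega); have c0 := hcell 0 (by omega)
  rw [hrange]
  rw [h6] at c5 c4 c3 c2 c1 c0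
  simp only [pvPlaceA, e5, e4, e3, e2, e1, e0,
    hcellr 5 (by omega), hcellr 4 (by omega), hcellr 3 (by omega),
    hcellr 2 (by omega), hcellr 1 (by omega), hcellr 0 (by omega),
    c5, c4, c3, c2, c1, c0]
  norm_num

lemma pvInv_set (b : List (List (Option Int))) (hs : List Int) (j : Nat) (p : Int)
    (hInv : pvInv b hs) (hj : j < 7) (hlt : hs.getD j 0 < 6) :
    pvInv (b.set (5 - (hs.getD j 0).toNat)
        ((b.getD (5 - (hs.getD j 0).toNat) []).set j (some p)))
      (hs.set j (hs.getD j 0 + 1)) := by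
  obtain ⟨hb6, hrows, hhs7, hcols⟩ := hInv
  obtain ⟨hh0, hh6, _⟩ := hcols j hj
  set h := hs.getD j 0 with hh
  set r0 : Nat := 5 - h.toNat with hr0
  have hr0' : (r0 : Int) = 5 - h := by omega
  have hr06 : r0 < 6 := by omega
  have hrowlen : ∀ r : Nat, r < 6 → (b.getD r []).length = 7 := by
    intro r hr
    have hlt : r < b.length := by omega
    rw [List.getD_eq_getElem b [] hlt]
    exact hrows _ (List.getElem_mem hlt)
  have hbget : ∀ r : Nat, r < 6 →
      (b.set r0 ((b.getD r0 []).set j (some p))).getD r [] =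
        if r0 = r then (b.getD r0 []).set j (some p) else b.getD r [] := by
    intro r hr
    have h1 : r < b.length := by omega
    rw [List.getD_eq_getElem _ [] (by simpa using h1), List.getD_eq_getElem _ [] h1,
      List.getElem_set]
  have hrget : ∀ j' : Nat, j' < 7 →
      ((b.getD r0 []).set j (some p)).getD j' none =
        if j = j' then some p else (b.getD r0 []).getD j' none := by
    intro j' hj'
    have h1 : j' < (b.getD r0 []).length := by rw [hrowlen r0 hr06]; omega
    rw [List.getD_eq_getElem _ none (by simpa using h1), List.getD_eq_getElem _ none h1,
      List.getElem_set]
  have hsget : ∀ j' : Nat, j' < 7 →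
      (hs.set j (h + 1)).getD j' 0 = if j = j' then h + 1 else hs.getD j' 0 := by
    intro j' hj'
    have h1 : j' < hs.length := by omega
    rw [List.getD_eq_getElem _ 0 (by simpa using h1), List.getD_eq_getElem _ 0 h1,
      List.getElem_set]
  refine ⟨by simp [hb6], ?_, by simp [hhs7], ?_⟩
  · intro row hmem
    rcases List.mem_or_eq_of_mem_set hmem with hm | hm
    · exact hrows _ hm
    · rw [hm, List.length_set]; exact hrowlen r0 hr06
  · intro j' hj'
    obtain ⟨hh0', hh6', hcell'⟩ := hcols j' hj'
    rw [hsget j' hj']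
    by_cases hjj : j = j'
    · subst hjj
      rw [if_pos rfl]
      refine ⟨by omega, by omega, ?_⟩
      intro r hr
      rw [hbget r hr]
      by_cases hrr : r0 = r
      · subst hrr
        rw [if_pos rfl, hrget j hj, if_pos rfl]
        simp
        omega
      · rw [if_neg hrr, hcell' r hr]
        omega
    · rw [if_neg hjj]
      refine ⟨hh0', hh6', ?_⟩
      intro r hr
      rw [hbget r hr]
      by_cases hrr : r0 = r
      · subst hrr
        rw [if_pos rfl, hrget j' hj', if_neg hjj]
        exact hcell' r0 hr
      · rw [if_neg hrr]
        exact hcell' r hr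


lemma pvStep_eq (b : List (List (Option Int))) (hs : List Int) (c p : Int)
    (hInv : pvInv b hs) (h1 : -7 ≤ c) (h2 : c < 7) :
    pvPlaceA (PySem.List.pyRange 5 (-1) (-1)) b c p =
      (if PySem.List.pyGetD hs c 0 < 6 then
        PySem.List.pySetD b (6 - 1 - PySem.List.pyGetD hs c 0)
          (PySem.List.pySetD
            (PySem.List.pyGetD b (6 - 1 - PySem.List.pyGetD hs c 0) []) c (some p))
       else b) ∧
    pvInv (if PySem.List.pyGetD hs c 0 < 6 then
        PySem.List.pySetD b (6 - 1 - PySem.List.pyGetD hs c 0)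
          (PySem.List.pySetD
            (PySem.List.pyGetD b (6 - 1 - PySem.List.pyGetD hs c 0) []) c (some p))
       else b)
      (if PySem.List.pyGetD hs c 0 < 6 then PySem.List.pySetD hs c (PySem.List.pyGetD hs c 0 + 1) else hs) := by
  obtain ⟨hb6, hrows, hhs7, hcols⟩ := hInv
  have hj : pvJ c < 7 := by unfold pvJ; split_ifs <;> omega
  obtain ⟨hh0, hh6, _⟩ := hcols (pvJ c) hj
  have hget : PySem.List.pyGetD hs c 0 = hs.getD (pvJ c) 0 := pvGetD_norm hs c 0 hhs7 h1 h2
  rw [hget]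
  set h := hs.getD (pvJ c) 0 with hh
  by_cases hcase : h < 6
  · rw [if_pos hcase, if_pos hcase]
    have hrowlen : (b.getD (5 - h.toNat) []).length = 7 := by
      have hlt : 5 - h.toNat < b.length := by omega
      rw [List.getD_eq_getElem b [] hlt]
      exact hrows _ (List.getElem_mem hlt)
    have hbd : (6 - 1 - h : Int).toNat = 5 - h.toNat := by omega
    have hrw : PySem.List.pySetD b (6 - 1 - h)
        (PySem.List.pySetD (PySem.List.pyGetD b (6 - 1 - h) []) c (some p)) =
        b.set (5 - h.toNat) ((b.getD (5 - h.toNat) []).set (pvJ c) (some p)) := by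
      rw [pvRowI b hb6 _ (by omega) (by omega), hbd,
        pvSetD_norm _ c _ hrowlen h1 h2,
        pvRowSetI b _ (by omega), hbd]
    rw [hrw, pvSetD_norm hs c _ hhs7 h1 h2]
    exact ⟨pvPlace_eq b hs c p ⟨hb6, hrows, hhs7, hcols⟩ h1 h2 hcase,
      pvInv_set b hs (pvJ c) p ⟨hb6, hrows, hhs7, hcols⟩ hj hcase⟩
  · rw [if_neg hcase, if_neg hcase]
    exact ⟨pvPlace_full b hs c p ⟨hb6, hrows, hhs7, hcols⟩ h1 h2 hcase,
      ⟨hb6, hrows, hhs7, hcols⟩⟩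

lemma pvLoop_eq (moves : List Int) :
    ∀ (b : List (List (Option Int))) (hs : List Int) (p : Int),
    pvInv b hs → Pre_board_from_moves moves →
    moves.foldl
      (fun st col =>
        (pvPlaceA (PySem.List.pyRange 5 (-1) (-1)) st.1 col st.2,
         if st.2 = 1 then 2 else 1)) (b, p) =
    ((moves.foldl
      (fun (st : List (List (Option Int)) × List Int × Int) col =>
        let b := st.1; let hs := st.2.1; let p := st.2.2
        let h := PySem.List.pyGetD hs col 0
        let st1 :=
          if h < 6 then
            (PySem.List.pySetD b (6 - 1 - h)
               (PySem.List.pySetD (PySem.List.pyGetD b (6 - 1 - h) []) col (some p)),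
             PySem.List.pySetD hs col (h + 1))
          else (b, hs)
        (st1.1, st1.2, if p = 1 then 2 else 1)) (b, hs, p)).1,
     (moves.foldl
      (fun (st : List (List (Option Int)) × List Int × Int) col =>
        let b := st.1; let hs := st.2.1; let p := st.2.2
        let h := PySem.List.pyGetD hs col 0
        let st1 :=
          if h < 6 then
            (PySem.List.pySetD b (6 - 1 - h)
               (PySem.List.pySetD (PySem.List.pyGetD b (6 - 1 - h) []) col (some p)),
             PySem.List.pySetD hs col (h + 1))
          else (b, hs)
        (st1.1, st1.2, if p = 1 then 2 else 1)) (b, hs, p)).2.2) := by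
  induction moves with
  | nil => intro b hs p _ _; rfl
  | cons c ms ih =>
    intro b hs p hInv hpre
    have hc := hpre c List.mem_cons_self
    have hstep := pvStep_eq b hs c p hInv hc.1 hc.2
    simp only [List.foldl_cons]
    by_cases hC : PySem.List.pyGetD hs c 0 < 6
    · simp only [if_pos hC] at hstep ⊢
      rw [hstep.1]
      exact ih _ _ _ hstep.2 (fun x hx => hpre x (List.mem_cons_of_mem c hx))
    · simp only [if_neg hC] at hstep ⊢
      rw [hstep.1]
      exact ih _ _ _ hstep.2 (fun x hx => hpre x (List.mem_cons_of_mem c hx))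

-- ===== VERDICT (by name: the statement is the Claim_ definition above) =====
theorem board_from_moves_spec : Claim_equal_board_from_moves := by
  intro moves _ hpre
  unfold Spec_board_from_moves board_from_moves board_from_moves_alt
  exact pvLoop_eq moves _ _ 1 (by unfold pvInv; decide) hpre
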